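-- pv_equiv track=rewrite | github.com/skybluesharkk/shim | pnu/2_2/자료구조/LAB03_카드셔플.py | find1to2
-- ===== SOURCE A (Python) =====
-- def cardshuffle(list):
--     n = len(list)
--     _result = []
--     if n%2==0:
--         n2 = int(n)/2
--         l1 = list[0:int(n2)]
--         l2 = list[int(n2):n]
--         for i in range(int(n2)):
--             _result.append(l1[i])
--             _result.append(l2[i])
--     else:
--         n2 = int(n//2)
--         l1 = list[0:n2+1]
--         l2 = list[n2+1:n]
--         for i in range(int(n2)):
--             _result.append(l1[i])
--             _result.append(l2[i])
--         _result.append(l1[n2])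
--     return _result
--
-- def allshuffle(list):
--     sa = []
--     tmp = []
--     tmp.extend(list)
--     for i in list:
--         sa.append(cardshuffle(tmp))
--         tmp = cardshuffle(tmp)
--     return sa
--
-- def find1to2(list1,list2):
--     n = 0
--     for i in allshuffle(list1):
--         if i == list2:
--             n += 1
--             break
--         n += 1
--     return n
-- ===== SOURCE B (Python) =====
-- def _riffle(xs):
--     n = len(xs)
--     h = (n + 1) // 2
--     out = [None] * n
--     out[::2] = xs[:h]
--     out[1::2] = xs[h:]
--     return out
--
-- def find1to2(list1, list2):
--     n = len(list1)
--     cur = list1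
--     for k in range(1, n + 1):
--         cur = _riffle(cur)
--         if cur == list2:
--             return k
--     return n
-- ===== Notes on version B (the rewrite author's own statement) =====
-- stated objective: faster
-- what changed: B replaces A's materialise-all-n-shuffles-then-scan (each shuffle computed twice via a per-element append loop, all n intermediate lists stored) with a single streaming loop that computes each shuffle once by two extended-slice assignments and returns early on the first match.
import Mathlib
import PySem

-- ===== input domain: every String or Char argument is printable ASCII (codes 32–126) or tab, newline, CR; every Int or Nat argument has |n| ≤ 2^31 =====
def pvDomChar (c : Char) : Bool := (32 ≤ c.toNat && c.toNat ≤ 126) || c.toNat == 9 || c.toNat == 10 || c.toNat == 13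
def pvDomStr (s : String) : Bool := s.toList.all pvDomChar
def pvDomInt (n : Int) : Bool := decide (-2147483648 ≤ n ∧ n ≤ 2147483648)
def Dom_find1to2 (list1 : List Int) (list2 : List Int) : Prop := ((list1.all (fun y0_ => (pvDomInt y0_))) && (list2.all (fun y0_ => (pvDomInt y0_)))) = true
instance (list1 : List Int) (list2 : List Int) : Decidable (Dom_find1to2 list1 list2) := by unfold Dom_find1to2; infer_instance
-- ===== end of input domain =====

-- B replaces A's materialise-all-n-shuffles-then-scan by a single streaming loop with early
-- return, computing each shuffle once by two extended-slice assignments (objective: faster by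
-- a constant factor — A computes every shuffle twice and stores all n intermediate lists).

-- ===== PORT A =====
-- cardshuffle: slices the list into two halves and appends alternately in a range loop.
-- (In Python `int(n)/2` is float true division; for even n ≤ 2^31 `int(n/2)` equals n // 2,
-- which is what this port writes.)
def cardshuffle (xs : List Int) : List Int :=
  let n : Int := (xs.length : Int)
  if PySem.Int.mod n 2 == 0 then
    let n2 : Int := PySem.Int.floordiv n 2
    let l1 := PySem.List.slice xs (some 0) (some n2)
    let l2 := PySem.List.slice xs (some n2) (some n)
    (PySem.List.pyRange 0 n2 1).foldl
      (fun acc i => (acc ++ [PySem.List.pyGetD l1 i 0]) ++ [PySem.List.pyGetD l2 i 0]) []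
  else
    let n2 : Int := PySem.Int.floordiv n 2
    let l1 := PySem.List.slice xs (some 0) (some (n2 + 1))
    let l2 := PySem.List.slice xs (some (n2 + 1)) (some n)
    ((PySem.List.pyRange 0 n2 1).foldl
      (fun acc i => (acc ++ [PySem.List.pyGetD l1 i 0]) ++ [PySem.List.pyGetD l2 i 0]) [])
      ++ [PySem.List.pyGetD l1 n2 0]

-- allshuffle: fold over the elements of the input (their values unused), appending
-- cardshuffle(tmp) to sa and recomputing cardshuffle(tmp) for the new tmp, as A does.
def allshuffle (xs : List Int) : List (List Int) :=
  (xs.foldl (fun (st : List (List Int) × List Int) _ =>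
      (st.1 ++ [cardshuffle st.2], cardshuffle st.2)) ([], xs)).1

-- the counting loop of find1to2 with its break
def findLoop (sa : List (List Int)) (l2 : List Int) (n : Int) : Int :=
  match sa with
  | [] => n
  | i :: rest => if i == l2 then n + 1 else findLoop rest l2 (n + 1)

def find1to2 (list1 : List Int) (list2 : List Int) : Int :=
  findLoop (allshuffle list1) list2 0

-- ===== PORT B =====
-- one riffle step; the two extended-slice assignments out[::2] = xs[:h], out[1::2] = xs[h:]
-- into a fresh list of length n are ported by hand: with len(xs[:h]) = ceil(n/2) and
-- len(xs[h:]) = floor(n/2) they make out the pairwise interleave of the two slices, with the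
-- leftover element xs[:h][-1] (odd n only) in the last position — exact for every list.
def riffle (xs : List Int) : List Int :=
  let h : Int := PySem.Int.floordiv ((xs.length : Int) + 1) 2
  let a := PySem.List.slice xs none (some h)
  let b := PySem.List.slice xs (some h) none
  let out := (a.zip b).flatMap (fun p => [p.1, p.2])
  if PySem.Int.mod ((xs.length : Int)) 2 == 0 then out else out ++ [PySem.List.pyGetD a (-1) 0]

-- B's for-k-in-range(1, n+1) loop with early return
def altGo (l2 : List Int) (n : Int) (ks : List Int) (cur : List Int) : Int :=
  match ks with
  | [] => n
  | k :: rest =>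
    let cur' := riffle cur
    if cur' == l2 then k else altGo l2 n rest cur'

def find1to2_alt (list1 : List Int) (list2 : List Int) : Int :=
  let n : Int := (list1.length : Int)
  altGo list2 n (PySem.List.pyRange 1 (n + 1) 1) list1

-- ===== PRECONDITION & SPEC =====
def Spec_find1to2 (list1 : List Int) (list2 : List Int) (out : Int) : Prop := out = find1to2_alt list1 list2
instance (list1 : List Int) (list2 : List Int) (out : Int) : Decidable (Spec_find1to2 list1 list2 out) := by unfold Spec_find1to2; infer_instance

-- ===== CLAIM (what is proved, stated in full; the proofs are below) =====
def Claim_equal_find1to2 : Prop := ∀ (list1 : List Int) (list2 : List Int), Dom_find1to2 list1 list2 → Spec_find1to2 list1 list2 (find1to2 list1 list2)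

-- ===== LEMMAS AND PROOFS =====

-- flattening the zip of two lists is the pairwise flatMap over the indices of the shorter
lemma zip_flatMap_eq_range (b a : List Int) (h : b.length ≤ a.length) :
    (a.zip b).flatMap (fun p => [p.1, p.2]) =
    (List.range b.length).flatMap (fun i => [a.getD i 0, b.getD i 0]) := by
  induction b generalizing a with
  | nil => simp
  | cons y b ih =>
    cases a with
    | nil => simp at h
    | cons x a =>
      simp only [List.zip_cons_cons, List.flatMap_cons, List.length_cons,
        List.range_succ_eq_map, List.flatMap_map]
      rw [ih a (by simpa using h)]
      simp

-- one shuffle step: A's slice-and-append loop equals B's interleave of the two halves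
lemma cardshuffle_eq_riffle (xs : List Int) : cardshuffle xs = riffle xs := by
  have hmod : PySem.Int.mod ((xs.length : Int)) 2 = ((xs.length % 2 : Nat) : Int) := by
    exact_mod_cast PySem.Int.mod_natCast xs.length 2
  have hdiv : PySem.Int.floordiv ((xs.length : Int)) 2 = ((xs.length / 2 : Nat) : Int) := by
    exact_mod_cast PySem.Int.floordiv_natCast xs.length 2
  have hdiv1 : PySem.Int.floordiv ((xs.length : Int) + 1) 2 = (((xs.length + 1) / 2 : Nat) : Int) := by
    have := PySem.Int.floordiv_natCast (xs.length + 1) 2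
    push_cast at this ⊢
    exact this
  unfold cardshuffle riffle
  rcases Nat.even_or_odd xs.length with ⟨m, hm⟩ | ⟨m, hm⟩
  · -- even: xs.length = 2*m
    have hlen : xs.length = 2 * m := by omega
    have hp : xs.length % 2 = 0 := by omega
    have hq : xs.length / 2 = m := by omega
    have hh : (xs.length + 1) / 2 = m := by omega
    simp only [hmod, hdiv, hdiv1, hp, hq, hh, Nat.cast_zero, beq_self_eq_true, if_true]
    rw [PySem.List.slice_natCast xs m xs.length]
    simp only [PySem.List.slice_zero_start]
    rw [PySem.List.slice_to_natCast xs m, PySem.List.slice_from_natCast xs m]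
    rw [PySem.List.pyRange_zero_natCast m]
    rw [List.foldl_map]
    simp only [PySem.List.pyGetD_natCast, List.append_assoc, List.singleton_append]
    rw [PySem.List.foldl_append_eq_flatMap
      (fun k : Nat => [(List.take m xs).getD k 0,
        (List.take (xs.length - m) (List.drop m xs)).getD k 0]) (List.range m) []]
    rw [List.nil_append]
    have hb : (List.drop m xs).length = m := by simp [hlen]; omega
    rw [zip_flatMap_eq_range (List.drop m xs) (List.take m xs)
      (by simp [hlen]; omega), hb]
    have ht : List.take (xs.length - m) (List.drop m xs) = List.drop m xs :=
      List.take_of_length_le (by simp [hlen])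
    rw [ht]
  · -- odd: xs.length = 2*m + 1
    have hlen : xs.length = 2 * m + 1 := by omega
    have hp : xs.length % 2 = 1 := by omega
    have hq : xs.length / 2 = m := by omega
    have hh : (xs.length + 1) / 2 = m + 1 := by omega
    simp only [hmod, hdiv, hdiv1, hp, hq, hh, Nat.cast_one]
    rw [if_neg (by decide), if_neg (by decide)]
    have hc : ((m : Int) + 1) = ((m + 1 : Nat) : Int) := by push_cast; ring
    rw [hc, PySem.List.slice_natCast xs (m+1) xs.length]
    simp only [PySem.List.slice_zero_start]
    rw [PySem.List.slice_to_natCast xs (m+1), PySem.List.slice_from_natCast xs (m+1)]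
    rw [PySem.List.pyRange_zero_natCast m]
    rw [List.foldl_map]
    simp only [PySem.List.pyGetD_natCast, List.append_assoc, List.singleton_append]
    rw [PySem.List.foldl_append_eq_flatMap
      (fun k : Nat => [(List.take (m+1) xs).getD k 0,
        (List.take (xs.length - (m+1)) (List.drop (m+1) xs)).getD k 0]) (List.range m) []]
    rw [List.nil_append]
    have hb : (List.drop (m+1) xs).length = m := by simp [hlen]; omega
    rw [zip_flatMap_eq_range (List.drop (m+1) xs) (List.take (m+1) xs)
      (by simp [hlen]; omega), hb]
    have ht : List.take (xs.length - (m+1)) (List.drop (m+1) xs) = List.drop (m+1) xs :=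
      List.take_of_length_le (by simp [hlen])
    rw [ht]
    congr 1
    -- the trailing middle element: l1[n2] vs a[-1]
    have hne : List.take (m+1) xs ≠ [] := by
      have : (List.take (m+1) xs).length = m + 1 := by simp [hlen]; omega
      intro hcon; rw [hcon] at this; simp at this
    rw [PySem.List.pyGetD_neg_one _ 0 hne]
    have hlt : (List.take (m+1) xs).length = m + 1 := by simp [hlen]; omega
    rw [List.getLast_eq_getElem, List.getD_eq_getElem?_getD,
      List.getElem?_eq_getElem (by omega)]
    simp [hlt]

-- unrolled generator of successive shuffles
def gen (cur : List Int) : Nat → List (List Int)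
  | 0 => []
  | m+1 => cardshuffle cur :: gen (cardshuffle cur) m

lemma allshuffle_foldl (ys : List Int) : ∀ (sa : List (List Int)) (tmp : List Int),
    ys.foldl (fun (st : List (List Int) × List Int) _ =>
      (st.1 ++ [cardshuffle st.2], cardshuffle st.2)) (sa, tmp)
    = (sa ++ gen tmp ys.length, cardshuffle^[ys.length] tmp) := by
  induction ys with
  | nil => intro sa tmp; simp [gen]
  | cons y ys ih =>
    intro sa tmp
    simp only [List.foldl_cons, List.length_cons]
    rw [ih]
    simp [gen, Function.iterate_succ_apply]

lemma allshuffle_eq_gen (xs : List Int) : allshuffle xs = gen xs xs.length := by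
  unfold allshuffle
  rw [allshuffle_foldl]
  simp

lemma loop_eq (l2 : List Int) : ∀ (m : Nat) (cur : List Int) (b N : Int), b + m = N →
    findLoop (gen cur m) l2 b = altGo l2 N (PySem.List.pyRange (b + 1) (N + 1) 1) cur := by
  intro m
  induction m with
  | zero =>
    intro cur b N h
    have hb : b = N := by omega
    subst hb
    rw [PySem.List.pyRange_one_eq_nil (by omega)]
    simp [gen, findLoop, altGo]
  | succ m ih =>
    intro cur b N h
    have hlt : b + 1 < N + 1 := by omega
    rw [PySem.List.pyRange_one_cons (by omega)]
    simp only [gen, findLoop, altGo, cardshuffle_eq_riffle]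
    split
    · rfl
    · rw [ih (riffle cur) (b+1) N (by push_cast at h ⊢; omega)]

-- ===== VERDICT (by name: the statement is the Claim_ definition above) =====
theorem find1to2_spec : Claim_equal_find1to2 := by
  intro l1 l2 _
  unfold Spec_find1to2 find1to2 find1to2_alt
  rw [allshuffle_eq_gen]
  have := loop_eq l2 l1.length l1 0 (l1.length : Int) (by omega)
  simpa using this
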